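-- pv_equiv track=rewrite | github.com/carlos-montiers/sokobanstein-3d | soko.py | parse_xsb
-- ===== SOURCE A (Python) =====
-- def parse_xsb(text: str):
--     levels, current = [], []
--     for line in text.splitlines():
--         line = line.rstrip("\n")
--         if not line.strip():
--             if current:
--                 levels.append(current)
--                 current = []
--         elif not line.lstrip().startswith(";"):
--             current.append(line)
--     if current:
--         levels.append(current)
--     return levels
-- ===== SOURCE B (Python) =====
-- def parse_xsb(text: str):
--     lines = text.splitlines()
--     levels, i, n = [], 0, len(lines)
--     while i < n:
--         if not lines[i].strip():
--             i += 1
--             continue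
--         j = i + 1
--         while j < n and lines[j].strip():
--             j += 1
--         level = [ln for ln in lines[i:j] if not ln.lstrip().startswith(";")]
--         if level:
--             levels.append(level)
--         i = j
--     return levels
-- ===== Notes on version B (the rewrite author's own statement) =====
-- stated objective: alternative
-- what changed: Replaced A's single-pass accumulator/flush state machine with a two-pointer run scanner: skip blank lines, find each maximal non-blank run with an inner index scan, filter out comment lines, and keep the run only if something remains.
import Mathlib
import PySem

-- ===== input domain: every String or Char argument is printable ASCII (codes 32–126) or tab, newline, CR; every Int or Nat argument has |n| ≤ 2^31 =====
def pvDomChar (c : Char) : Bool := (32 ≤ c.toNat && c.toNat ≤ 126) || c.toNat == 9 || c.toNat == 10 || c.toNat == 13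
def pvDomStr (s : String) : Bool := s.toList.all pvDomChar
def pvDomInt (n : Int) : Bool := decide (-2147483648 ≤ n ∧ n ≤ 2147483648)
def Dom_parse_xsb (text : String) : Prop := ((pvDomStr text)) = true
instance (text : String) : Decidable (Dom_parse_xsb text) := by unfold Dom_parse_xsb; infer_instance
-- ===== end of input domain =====

-- B replaces A's flush-accumulator state machine with a run scanner (skip blanks, take a
-- maximal non-blank run, filter comments, keep if non-empty); same cost, different structure.

-- ===== PORT A =====
-- line.rstrip("\n"): hand port (PySem has no rstrip-with-chars); exact: drops trailing '\n' chars.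
def pvRstripNl (s : String) : String :=
  String.ofList ((s.toList.reverse.dropWhile (fun c => c = '\n')).reverse)

-- the loop body of A (st = (levels, current))
def pvAStep (st : List (List String) × List String) (line0 : String) :
    List (List String) × List String :=
  let line := pvRstripNl line0
  if PySem.Str.strip line == "" then
    if st.2.isEmpty then st else (st.1 ++ [st.2], [])
  else if !(PySem.Str.startswith (PySem.Str.lstrip line) ";") then
    (st.1, st.2 ++ [line])
  else st

def parse_xsb (text : String) : List (List String) :=
  let r := (PySem.Str.splitlines text).foldl pvAStep ([], [])
  if r.2.isEmpty then r.1 else r.1 ++ [r.2]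

-- ===== PORT B =====
-- run scanner over the line list: 'ls.takeWhile/dropWhile' is the inner `while j < n and lines[j].strip()` scan
def parse_xsb_alt_go : List String → List (List String)
  | [] => []
  | l :: ls =>
    if PySem.Str.strip l == "" then parse_xsb_alt_go ls
    else
      let g := ls.takeWhile (fun x => !(PySem.Str.strip x == ""))
      let rest := ls.dropWhile (fun x => !(PySem.Str.strip x == ""))
      let lvl := (l :: g).filter (fun x => !(PySem.Str.startswith (PySem.Str.lstrip x) ";"))
      (if lvl.isEmpty then [] else [lvl]) ++ parse_xsb_alt_go rest
  termination_by ls => ls.length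
  decreasing_by
    all_goals
      have := (List.dropWhile_sublist (l := ls) (p := fun x => !(PySem.Str.strip x == ""))).length_le
      simp
      try omega

def parse_xsb_alt (text : String) : List (List String) :=
  parse_xsb_alt_go (PySem.Str.splitlines text)

-- ===== PRECONDITION & SPEC =====
def Spec_parse_xsb (text : String) (out : List (List String)) : Prop := out = parse_xsb_alt text
instance (text : String) (out : List (List String)) : Decidable (Spec_parse_xsb text out) := by unfold Spec_parse_xsb; infer_instance

-- ===== CLAIM (what is proved, stated in full; the proofs are below) =====
def Claim_equal_parse_xsb : Prop := ∀ (text : String), Dom_parse_xsb text → Spec_parse_xsb text (parse_xsb text)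

-- ===== LEMMAS AND PROOFS =====

-- recursive characterisation of A's fold (on lines to which rstrip("\n") is the identity)
def pvAGo : List String → List String → List (List String)
  | [], cur => if cur.isEmpty then [] else [cur]
  | l :: ls, cur =>
    if PySem.Str.strip l == "" then
      (if cur.isEmpty then [] else [cur]) ++ pvAGo ls []
    else if !(PySem.Str.startswith (PySem.Str.lstrip l) ";") then
      pvAGo ls (cur ++ [l])
    else
      pvAGo ls cur

-- rstrip("\n") is the identity on a line without '\n'
theorem pvRstripNl_id (s : String) (h : '\n' ∉ s.toList) : pvRstripNl s = s := by
  unfold pvRstripNl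
  have hd : s.toList.reverse.dropWhile (fun c => c = '\n') = s.toList.reverse := by
    cases hrev : s.toList.reverse with
    | nil => simp
    | cons a t =>
      have ha : a ∈ s.toList := by
        have : a ∈ s.toList.reverse := by rw [hrev]; exact List.mem_cons_self
        simpa using this
      have : a ≠ '\n' := fun he => h (he ▸ ha)
      simp [this]
  rw [hd]
  simp

-- invariant of splitlines.go: no output line contains a break character
theorem pvGoNoBreak (isB : Char → Bool) : ∀ (n : Nat) (s : List Char), s.length ≤ n →
    ∀ (cur : List Char) (acc : List (List Char)),
    (∀ c ∈ cur, isB c = false) → (∀ l ∈ acc, ∀ c ∈ l, isB c = false) →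
    ∀ l ∈ PySem.Chars.splitlines.go isB s cur acc, ∀ c ∈ l, isB c = false := by
  intro n
  induction n with
  | zero =>
    intro s hs cur acc hcur hacc
    have hnil : s = [] := by cases s <;> simp_all
    subst hnil
    rw [show PySem.Chars.splitlines.go isB [] cur acc
        = if cur.isEmpty = true then acc.reverse else (cur.reverse :: acc).reverse from rfl]
    intro l hl c hc
    by_cases hce : cur.isEmpty
    · simp [hce] at hl; exact hacc l hl c hc
    · simp [hce] at hl
      rcases hl with h | h
      · exact hacc l h c hc
      · subst h; exact hcur c (by simpa using hc)
  | succ n ih =>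
    intro s hs cur acc hcur hacc
    rw [PySem.Chars.splitlines.go.eq_def]
    split
    · intro l hl c hc
      by_cases hce : cur.isEmpty
      · simp [hce] at hl; exact hacc l hl c hc
      · simp [hce] at hl
        rcases hl with h | h
        · exact hacc l h c hc
        · subst h; exact hcur c (by simpa using hc)
    · rename_i rest
      apply ih rest (by simp at hs ⊢; omega) [] _ (by simp)
      intro l hl
      rcases List.mem_cons.mp hl with h | h
      · subst h; intro c hc; exact hcur c (by simpa using hc)
      · exact hacc l h
    · rename_i c rest hne
      split
      · apply ih rest (by simp at hs ⊢; omega) [] _ (by simp)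
        intro l hl
        rcases List.mem_cons.mp hl with h | h
        · subst h; intro d hd; exact hcur d (by simpa using hd)
        · exact hacc l h
      · rename_i hc
        apply ih rest (by simp at hs ⊢; omega) (c :: cur) _ _ hacc
        intro d hd
        rcases List.mem_cons.mp hd with h | h
        · subst h; simpa using hc
        · exact hcur d h

theorem pvSplitlinesNoNl (text : String) : ∀ l ∈ PySem.Str.splitlines text, '\n' ∉ l.toList := by
  intro l hl hc
  have hm : l.toList ∈ PySem.Chars.splitlines text.toList := by
    rw [← PySem.Str.splitlines_map_toList]
    exact List.mem_map_of_mem hl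
  unfold PySem.Chars.splitlines at hm
  have hf := pvGoNoBreak _ text.toList.length text.toList le_rfl [] []
    (by simp) (by simp) l.toList hm '\n' hc
  simp at hf

-- A's fold, with the final flush, accumulates pvAGo
theorem pvFoldA : ∀ (ls : List String) (levels : List (List String)) (cur : List String),
    (∀ l ∈ ls, pvRstripNl l = l) →
    (if (ls.foldl pvAStep (levels, cur)).2.isEmpty
      then (ls.foldl pvAStep (levels, cur)).1
      else (ls.foldl pvAStep (levels, cur)).1 ++ [(ls.foldl pvAStep (levels, cur)).2])
    = levels ++ pvAGo ls cur := by
  intro ls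
  induction ls with
  | nil =>
    intro levels cur _
    simp only [List.foldl_nil, pvAGo]
    split <;> simp
  | cons l ls ih =>
    intro levels cur h
    have hl : pvRstripNl l = l := h l List.mem_cons_self
    have hrest : ∀ x ∈ ls, pvRstripNl x = x := fun x hx => h x (List.mem_cons_of_mem l hx)
    rw [List.foldl_cons]
    by_cases hb : PySem.Str.strip l == ""
    all_goals simp only [beq_iff_eq] at hb
    · by_cases hce : cur.isEmpty
      · have hc0 : cur = [] := by simpa using hce
        subst hc0
        have hstep : pvAStep (levels, []) l = (levels, []) := by
          simp [pvAStep, hl, hb]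
        rw [hstep, ih levels [] hrest]
        simp [pvAGo, hb]
      · have hstep : pvAStep (levels, cur) l = (levels ++ [cur], []) := by
          simp [pvAStep, hl, hb, hce]
        rw [hstep, ih (levels ++ [cur]) [] hrest]
        have hne : ¬ cur = [] := by simpa [List.isEmpty_iff] using hce
        simp [pvAGo, hb, hne, List.append_assoc]
    · by_cases hcm : PySem.Str.startswith (PySem.Str.lstrip l) ";"
      all_goals simp at hcm
      · have hstep : pvAStep (levels, cur) l = (levels, cur) := by
          simp [pvAStep, hl, hb, hcm]
        rw [hstep, ih levels cur hrest]
        simp [pvAGo, hb, hcm]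
      · have hstep : pvAStep (levels, cur) l = (levels, cur ++ [l]) := by
          simp [pvAStep, hl, hb, hcm]
        rw [hstep, ih levels (cur ++ [l]) hrest]
        simp [pvAGo, hb, hcm]

def pvTail (ls : List String) : List (List String) :=
  match ls with
  | [] => []
  | _ :: r => pvAGo r []

-- run decomposition of pvAGo
theorem pvAGoSpan : ∀ (ls : List String) (cur : List String),
    pvAGo ls cur =
      (if (cur ++ (ls.takeWhile (fun x => !(PySem.Str.strip x == ""))).filter
            (fun x => !(PySem.Str.startswith (PySem.Str.lstrip x) ";"))).isEmpty
        then []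
        else [cur ++ (ls.takeWhile (fun x => !(PySem.Str.strip x == ""))).filter
            (fun x => !(PySem.Str.startswith (PySem.Str.lstrip x) ";"))]) ++
      pvTail (ls.dropWhile (fun x => !(PySem.Str.strip x == ""))) := by
  intro ls
  induction ls with
  | nil => intro cur; simp [pvAGo, pvTail]
  | cons l ls ih =>
    intro cur
    by_cases hb : PySem.Str.strip l == ""
    · simp only [List.takeWhile_cons, List.dropWhile_cons, hb, Bool.not_true,
        Bool.false_eq_true, if_false, pvTail]
      simp [pvAGo, hb]
    · have hb' : (PySem.Str.strip l == "") = false := by simpa using hb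
      simp only [List.takeWhile_cons, List.dropWhile_cons, hb', Bool.not_false, if_true]
      by_cases hcm : PySem.Str.startswith (PySem.Str.lstrip l) ";"
      · have hcmc : PySem.Chars.startswith (PySem.Chars.lstrip l.toList) [';'] = true := by
          simpa using hcm
        simp only [pvAGo, hb', hcm, Bool.false_eq_true, if_false, Bool.not_true]
        rw [ih cur]
        simp [hcmc]
      · have hcm' : (PySem.Str.startswith (PySem.Str.lstrip l) ";") = false := by
          simpa using hcm
        have hcmc : PySem.Chars.startswith (PySem.Chars.lstrip l.toList) [';'] = false := by
          simpa using hcm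
        simp only [pvAGo, hb', hcm', Bool.false_eq_true, if_false, Bool.not_false, if_true]
        rw [ih (cur ++ [l])]
        simp [hcmc, List.append_assoc]

theorem pvDropWhileHead {p : String → Bool} : ∀ (l : List String) (b : String) (r : List String),
    l.dropWhile p = b :: r → p b = false := by
  intro l
  induction l with
  | nil => intro b r h; simp at h
  | cons a t ih =>
    intro b r h
    rw [List.dropWhile_cons] at h
    by_cases hp : p a
    · simp [hp] at h; exact ih b r h
    · simp [hp] at h; rw [← h.1]; simpa using hp

theorem pvMain : ∀ (n : Nat) (ls : List String), ls.length ≤ n →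
    pvAGo ls [] = parse_xsb_alt_go ls := by
  intro n
  induction n with
  | zero =>
    intro ls h
    have : ls = [] := by cases ls <;> simp_all
    subst this
    simp [pvAGo, parse_xsb_alt_go]
  | succ n ih =>
    intro ls h
    cases ls with
    | nil => simp [pvAGo, parse_xsb_alt_go]
    | cons l ls =>
      have hlen : ls.length ≤ n := by simp at h; omega
      by_cases hb : PySem.Str.strip l == ""
      · simp only [pvAGo, hb, if_true, List.isEmpty_nil, List.nil_append]
        rw [ih ls hlen, parse_xsb_alt_go]
        simp [hb]
      · have hb' : (PySem.Str.strip l == "") = false := by simpa using hb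
        rw [pvAGoSpan (l :: ls) [], parse_xsb_alt_go]
        simp only [List.takeWhile_cons, List.dropWhile_cons, hb', Bool.not_false, if_true,
          Bool.false_eq_true, if_false, List.nil_append]
        cases hd : ls.dropWhile (fun x => !(PySem.Str.strip x == "")) with
        | nil => simp [pvTail, parse_xsb_alt_go]
        | cons b r =>
          have hbb : (fun x => !(PySem.Str.strip x == "")) b = false := pvDropWhileHead ls b r hd
          have hbb' : (PySem.Str.strip b == "") = true := by simpa using hbb
          have hrlen : r.length ≤ n := by
            have := (List.dropWhile_sublist (l := ls)
              (p := fun x => !(PySem.Str.strip x == ""))).length_le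
            rw [hd] at this
            simp at this
            omega
          simp only [pvTail]
          rw [ih r hrlen, parse_xsb_alt_go]
          simp [hbb']

-- ===== VERDICT (by name: the statement is the Claim_ definition above) =====
theorem parse_xsb_spec : Claim_equal_parse_xsb := by
  intro text _
  unfold Spec_parse_xsb parse_xsb parse_xsb_alt
  have h : ∀ l ∈ PySem.Str.splitlines text, pvRstripNl l = l := fun l hl =>
    pvRstripNl_id l (pvSplitlinesNoNl text l hl)
  have := pvFoldA (PySem.Str.splitlines text) [] [] h
  simp only [List.nil_append] at this
  exact this.trans (pvMain (PySem.Str.splitlines text).length _ le_rfl)
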